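-- pv_equiv track=rewrite | github.com/atha333/Path-Finding-and-Hide-and-Seek | arrange_pichus.py | adiag_invalid_list
-- ===== SOURCE A (Python) =====
-- def adiag_invalid_list(house_map):
--     loc_p = [(row,col) for col in range(len(house_map[0])) for row in range(len(house_map)) if house_map[row][col]=="p"]
--     row_count=len(house_map) #No of rows
--     col_count=len(house_map[0]) #No of columns
--     invalid_coord_in_adiag=[]
--
--     #Repeat for all positions of p
--     for location in loc_p:
--         i=location[0] #Iterator starting from r
--         j=location[1] #Iterator starting from c
--         r=location[0] #Row coordinate
--         c=location[1] #Column coordinate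
--
--         #Traveling towards north east form (r,c)
--         while ((i>0)and(j<col_count-1)):
--             if house_map[i-1][j+1] in 'X@':
--                 break
--             elif house_map[i-1][j+1] =='.':
--                 invalid_coord_in_adiag.append((i-1,j+1))
--             i-=1
--             j+=1
--
--
--         i=r #Reinitialize variable
--         j=c #Reinitialize variable
--         #Traveling towards South West from (r,c)
--         while ((i<row_count-1)and(j>0)):
--             if house_map[i+1][j-1] in 'X@':
--                 break
--             elif house_map[i+1][j-1] =='.':
--                 invalid_coord_in_adiag.append((i+1,j-1))
--             i+=1
--             j-=1
--
--     return invalid_coord_in_adiag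
-- ===== SOURCE B (Python) =====
-- def adiag_invalid_list(house_map):
--     rows = len(house_map)
--     cols = len(house_map[0])
--     # First pass: for every non-blocker cell on each anti-diagonal d = r + c,
--     # record the row bounds of its maximal blocker-free segment.
--     lo_of = {}
--     hi_of = {}
--     for d in range(rows + cols - 1):
--         i_min = max(0, d - cols + 1)
--         i_max = min(rows - 1, d)
--         lo = i_min
--         for i in range(i_min, i_max + 1):
--             if house_map[i][d - i] in 'X@':
--                 lo = i + 1
--             else:
--                 lo_of[(i, d - i)] = lo
--         hi = i_max
--         for i in range(i_max, i_min - 1, -1):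
--             if house_map[i][d - i] in 'X@':
--                 hi = i - 1
--             else:
--                 hi_of[(i, d - i)] = hi
--     # Second pass: p locations in column-major order; emit '.' cells NE-outward,
--     # then SW-outward, within the precomputed segment bounds.
--     out = []
--     for c in range(cols):
--         for r in range(rows):
--             if house_map[r][c] == 'p':
--                 d = r + c
--                 for i in range(r - 1, lo_of[(r, c)] - 1, -1):
--                     if house_map[i][d - i] == '.':
--                         out.append((i, d - i))
--                 for i in range(r + 1, hi_of[(r, c)] + 1):
--                     if house_map[i][d - i] == '.':
--                         out.append((i, d - i))
--     return out
-- ===== Notes on version B (the rewrite author's own statement) =====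
-- stated objective: alternative
-- what changed: B replaces A's per-p break-on-blocker diagonal walks by a two-phase algorithm: a first pass over every anti-diagonal precomputes each cell's blocker-free segment bounds into dicts, and a second pass emits the '.' cells for each p by enumerating ranges between the precomputed bounds (no blocker tests in the per-p loops).
import Mathlib
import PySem

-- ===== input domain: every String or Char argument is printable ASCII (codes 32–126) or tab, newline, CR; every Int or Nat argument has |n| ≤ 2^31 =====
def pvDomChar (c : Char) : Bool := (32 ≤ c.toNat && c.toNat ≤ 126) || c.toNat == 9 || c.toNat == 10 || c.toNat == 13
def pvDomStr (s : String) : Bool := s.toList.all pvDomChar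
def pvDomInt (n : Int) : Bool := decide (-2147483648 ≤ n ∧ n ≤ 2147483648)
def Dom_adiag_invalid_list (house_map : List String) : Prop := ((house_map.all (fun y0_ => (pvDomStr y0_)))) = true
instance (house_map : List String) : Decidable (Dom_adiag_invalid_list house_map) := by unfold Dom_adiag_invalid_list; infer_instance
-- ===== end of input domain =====

-- B precomputes, per anti-diagonal, each cell's blocker-free segment bounds in one pass,
-- then enumerates the '.' cells for each 'p' between the precomputed bounds (objective: alternative).

-- grid accessor house_map[i][j]; total with default '?', exact where both indices are in range
def pvCell (house_map : List String) (i j : Int) : Char :=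
  (((PySem.List.pyGet? house_map i).map String.toList).bind
    (fun s => PySem.List.pyGet? s j)).getD '?'

-- ===== PORT A =====
-- while loop 'Traveling towards north east', decreasing i
def pvNeWalk (house_map : List String) (col_count : Int) (i j : Int)
    (acc : List (Int × Int)) : List (Int × Int) :=
  if h : 0 < i ∧ j < col_count - 1 then
    if pvCell house_map (i-1) (j+1) = 'X' ∨ pvCell house_map (i-1) (j+1) = '@' then acc
    else pvNeWalk house_map col_count (i-1) (j+1)
      (if pvCell house_map (i-1) (j+1) = '.' then acc ++ [(i-1, j+1)] else acc)
  else acc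
termination_by i.toNat
decreasing_by omega

-- while loop 'Traveling towards South West', decreasing j
def pvSwWalk (house_map : List String) (row_count : Int) (i j : Int)
    (acc : List (Int × Int)) : List (Int × Int) :=
  if h : i < row_count - 1 ∧ 0 < j then
    if pvCell house_map (i+1) (j-1) = 'X' ∨ pvCell house_map (i+1) (j-1) = '@' then acc
    else pvSwWalk house_map row_count (i+1) (j-1)
      (if pvCell house_map (i+1) (j-1) = '.' then acc ++ [(i+1, j-1)] else acc)
  else acc
termination_by j.toNat
decreasing_by omega

def adiag_invalid_list (house_map : List String) : List (Int × Int) :=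
  let row_count : Int := (house_map.length : Int)
  let col_count : Int := ((((PySem.List.pyGet? house_map 0).map String.toList).getD []).length : Int)
  let loc_p : List (Int × Int) :=
    (PySem.List.pyRange 0 col_count 1).flatMap (fun col =>
      ((PySem.List.pyRange 0 row_count 1).filter
        (fun row => pvCell house_map row col == 'p')).map (fun row => (row, col)))
  loc_p.foldl (fun acc loc =>
    pvSwWalk house_map row_count loc.1 loc.2
      (pvNeWalk house_map col_count loc.1 loc.2 acc)) []

-- ===== PORT B =====
-- forward scan of one anti-diagonal, recording each non-blocker cell's low segment bound
def pvLoPass (house_map : List String) (d i_min i_max : Int)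
    (dct : PySem.Dict (Int × Int) Int) : Int × PySem.Dict (Int × Int) Int :=
  (PySem.List.pyRange i_min (i_max + 1) 1).foldl
    (fun st i =>
      if pvCell house_map i (d - i) = 'X' ∨ pvCell house_map i (d - i) = '@' then
        (i + 1, st.2)
      else (st.1, st.2.insert (i, d - i) st.1))
    (i_min, dct)

-- backward scan of one anti-diagonal, recording each non-blocker cell's high segment bound
def pvHiPass (house_map : List String) (d i_min i_max : Int)
    (dct : PySem.Dict (Int × Int) Int) : Int × PySem.Dict (Int × Int) Int :=
  (PySem.List.pyRange i_max (i_min - 1) (-1)).foldl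
    (fun st i =>
      if pvCell house_map i (d - i) = 'X' ∨ pvCell house_map i (d - i) = '@' then
        (i - 1, st.2)
      else (st.1, st.2.insert (i, d - i) st.1))
    (i_max, dct)

def adiag_invalid_list_alt (house_map : List String) : List (Int × Int) :=
  let rows : Int := (house_map.length : Int)
  let cols : Int := ((((PySem.List.pyGet? house_map 0).map String.toList).getD []).length : Int)
  let tables : PySem.Dict (Int × Int) Int × PySem.Dict (Int × Int) Int :=
    (PySem.List.pyRange 0 (rows + cols - 1) 1).foldl
      (fun tb d =>
        let i_min := max 0 (d - cols + 1)
        let i_max := min (rows - 1) d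
        ((pvLoPass house_map d i_min i_max tb.1).2,
         (pvHiPass house_map d i_min i_max tb.2).2))
      (PySem.Dict.empty, PySem.Dict.empty)
  let lo_of := tables.1
  let hi_of := tables.2
  (PySem.List.pyRange 0 cols 1).foldl (fun out c =>
    (PySem.List.pyRange 0 rows 1).foldl (fun out r =>
      if pvCell house_map r c = 'p' then
        let d := r + c
        let out1 := (PySem.List.pyRange (r - 1) (lo_of.getD (r, c) 0 - 1) (-1)).foldl
          (fun a i => if pvCell house_map i (d - i) = '.' then a ++ [(i, d - i)] else a) out
        (PySem.List.pyRange (r + 1) (hi_of.getD (r, c) 0 + 1) 1).foldl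
          (fun a i => if pvCell house_map i (d - i) = '.' then a ++ [(i, d - i)] else a) out1
      else out) out) []

-- ===== PRECONDITION & SPEC =====
-- Pre_ excludes exactly the inputs where Python A raises: the empty list (house_map[0])
-- and maps with a row shorter than the first row (IndexError while scanning for 'p').
def Pre_adiag_invalid_list (house_map : List String) : Prop :=
  house_map ≠ [] ∧
  ∀ s ∈ house_map, (house_map.headD "").toList.length ≤ s.toList.length
instance (house_map : List String) : Decidable (Pre_adiag_invalid_list house_map) := by
  unfold Pre_adiag_invalid_list; infer_instance

def pvWitness_adiag_invalid_list : List String := ["p..", ".X.", "..p"]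

def Spec_adiag_invalid_list (house_map : List String) (out : List (Int × Int)) : Prop := out = adiag_invalid_list_alt house_map
instance (house_map : List String) (out : List (Int × Int)) : Decidable (Spec_adiag_invalid_list house_map out) := by unfold Spec_adiag_invalid_list; infer_instance

-- ===== CLAIM (what is proved, stated in full; the proofs are below) =====
def Claim_equal_adiag_invalid_list : Prop := ∀ (house_map : List String), Dom_adiag_invalid_list house_map → Pre_adiag_invalid_list house_map → Spec_adiag_invalid_list house_map (adiag_invalid_list house_map)

-- ===== LEMMAS AND PROOFS =====

-- defs
def pvF (hm : List String) (d : Int) : List (Int × Int) → Int → List (Int × Int) :=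
  fun a i => if pvCell hm i (d - i) = '.' then a ++ [(i, d - i)] else a

def pvLoF (hm : List String) (C : Int) (i j : Int) : Int :=
  if h : 0 < i ∧ j < C - 1 then
    if pvCell hm (i-1) (j+1) = 'X' ∨ pvCell hm (i-1) (j+1) = '@' then i
    else pvLoF hm C (i-1) (j+1)
  else i
termination_by i.toNat
decreasing_by omega

def pvHiF (hm : List String) (R : Int) (i j : Int) : Int :=
  if h : i < R - 1 ∧ 0 < j then
    if pvCell hm (i+1) (j-1) = 'X' ∨ pvCell hm (i+1) (j-1) = '@' then i
    else pvHiF hm R (i+1) (j-1)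
  else i
termination_by j.toNat
decreasing_by omega

lemma pvLoF_le (hm : List String) (C i j : Int) : pvLoF hm C i j ≤ i := by
  fun_induction pvLoF <;> omega

lemma pvHiF_ge (hm : List String) (R i j : Int) : i ≤ pvHiF hm R i j := by
  fun_induction pvHiF <;> omega

lemma ne_walk_eq (hm : List String) (C i j : Int) (acc : List (Int × Int)) :
    pvNeWalk hm C i j acc =
      (PySem.List.pyRange (i-1) (pvLoF hm C i j - 1) (-1)).foldl (pvF hm (i+j)) acc := by
  fun_induction pvNeWalk hm C i j acc with
  | case1 i j acc h hblk =>
    rw [pvLoF, dif_pos h, if_pos hblk, PySem.List.pyRange_neg_one_eq_nil (by omega)]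
    rfl
  | case2 i j acc h hblk ih =>
    rw [pvLoF, dif_pos h, if_neg hblk]
    have hle : pvLoF hm C (i-1) (j+1) ≤ i - 1 := pvLoF_le hm C (i-1) (j+1)
    rw [PySem.List.pyRange_neg_one_cons (by omega), List.foldl_cons]
    have hd : (i-1) + (j+1) = i + j := by ring
    simp only [dite_eq_ite] at ih
    rw [hd] at ih
    rw [ih]
    congr 1
    simp only [pvF]
    have h2 : i + j - (i - 1) = j + 1 := by ring
    rw [h2]
  | case3 i j acc h =>
    rw [pvLoF, dif_neg h, PySem.List.pyRange_neg_one_eq_nil (by omega)]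
    rfl

lemma sw_walk_eq (hm : List String) (R i j : Int) (acc : List (Int × Int)) :
    pvSwWalk hm R i j acc =
      (PySem.List.pyRange (i+1) (pvHiF hm R i j + 1) 1).foldl (pvF hm (i+j)) acc := by
  fun_induction pvSwWalk hm R i j acc with
  | case1 i j acc h hblk =>
    rw [pvHiF, dif_pos h, if_pos hblk, PySem.List.pyRange_one_eq_nil (by omega)]
    rfl
  | case2 i j acc h hblk ih =>
    rw [pvHiF, dif_pos h, if_neg hblk]
    have hge : i + 1 ≤ pvHiF hm R (i+1) (j-1) := pvHiF_ge hm R (i+1) (j-1)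
    rw [PySem.List.pyRange_one_cons (by omega), List.foldl_cons]
    have hd : (i+1) + (j-1) = i + j := by ring
    simp only [dite_eq_ite] at ih
    rw [hd] at ih
    rw [ih]
    congr 1
    simp only [pvF]
    have h2 : i + j - (i + 1) = j - 1 := by ring
    rw [h2]
  | case3 i j acc h =>
    rw [pvHiF, dif_neg h, PySem.List.pyRange_one_eq_nil (by omega)]
    rfl

lemma loPass_aux (hm : List String) (C d : Int) :
    ∀ (n : Nat) (a i_max : Int) (dct : PySem.Dict (Int × Int) Int),
    (i_max + 1 - a).toNat = n → max 0 (d - C + 1) ≤ a →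
    ∀ (key : Int × Int) (v : Int),
    (((PySem.List.pyRange a (i_max + 1) 1).foldl
      (fun st i =>
        if pvCell hm i (d - i) = 'X' ∨ pvCell hm i (d - i) = '@' then (i + 1, st.2)
        else (st.1, st.2.insert (i, d - i) st.1))
      (pvLoF hm C a (d - a), dct)).2).getD key v =
    if key.2 = d - key.1 ∧ a ≤ key.1 ∧ key.1 ≤ i_max ∧
        ¬(pvCell hm key.1 key.2 = 'X' ∨ pvCell hm key.1 key.2 = '@')
      then pvLoF hm C key.1 key.2 else dct.getD key v := by
  intro n
  induction n with
  | zero =>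
    intro a i_max dct hn ha key v
    rw [PySem.List.pyRange_one_eq_nil (by omega), List.foldl_nil,
      if_neg (by rintro ⟨-, h2, h3, -⟩; omega)]
  | succ n ih =>
    intro a i_max dct hn ha key v
    rw [PySem.List.pyRange_one_cons (by omega), List.foldl_cons]
    have e1 : a + 1 - 1 = a := by ring
    have e2 : d - (a + 1) + 1 = d - a := by ring
    by_cases hblk : pvCell hm a (d - a) = 'X' ∨ pvCell hm a (d - a) = '@'
    · rw [if_pos hblk]
      have hstep : pvLoF hm C (a + 1) (d - (a + 1)) = a + 1 := by
        rw [pvLoF, dif_pos ⟨by omega, by omega⟩, e1, e2, if_pos hblk]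
      rw [show ((a + 1 : Int), dct) = (pvLoF hm C (a+1) (d - (a+1)), dct) by rw [hstep],
        ih (a+1) i_max dct (by omega) (by omega) key v]
      by_cases hc : key.2 = d - key.1 ∧ a ≤ key.1 ∧ key.1 ≤ i_max ∧
          ¬(pvCell hm key.1 key.2 = 'X' ∨ pvCell hm key.1 key.2 = '@')
      · obtain ⟨h1, h2, h3, h4⟩ := hc
        have hne : key.1 ≠ a := by
          intro he
          apply h4
          rw [he, h1, he]
          exact hblk
        rw [if_pos ⟨h1, by omega, h3, h4⟩, if_pos ⟨h1, h2, h3, h4⟩]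
      · rw [if_neg (by rintro ⟨h1, h2, h3, h4⟩; exact hc ⟨h1, by omega, h3, h4⟩),
          if_neg hc]
    · rw [if_neg hblk]
      have hstep : pvLoF hm C (a + 1) (d - (a + 1)) = pvLoF hm C a (d - a) := by
        rw [pvLoF, dif_pos ⟨by omega, by omega⟩, e1, e2, if_neg hblk]
      rw [show ((pvLoF hm C a (d-a) : Int), dct.insert (a, d - a) (pvLoF hm C a (d-a)))
            = (pvLoF hm C (a+1) (d - (a+1)), dct.insert (a, d - a) (pvLoF hm C a (d-a)))
            by rw [hstep],
        ih (a+1) i_max (dct.insert (a, d - a) (pvLoF hm C a (d-a))) (by omega) (by omega) key v,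
        PySem.Dict.getD_insert]
      by_cases hk : key = (a, d - a)
      · rw [if_neg (by rintro ⟨-, h2, -, -⟩; rw [hk] at h2; omega), if_pos hk,
          if_pos (by rw [hk]; exact ⟨rfl, le_refl a, by omega, hblk⟩), hk]
      · by_cases hc : key.2 = d - key.1 ∧ a ≤ key.1 ∧ key.1 ≤ i_max ∧
            ¬(pvCell hm key.1 key.2 = 'X' ∨ pvCell hm key.1 key.2 = '@')
        · obtain ⟨h1, h2, h3, h4⟩ := hc
          have hne : key.1 ≠ a := by
            intro he
            exact hk (Prod.ext_iff.mpr ⟨he, by show key.2 = d - a; rw [h1, he]⟩)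
          rw [if_pos ⟨h1, by omega, h3, h4⟩, if_pos ⟨h1, h2, h3, h4⟩]
        · rw [if_neg (by rintro ⟨h1, h2, h3, h4⟩; exact hc ⟨h1, by omega, h3, h4⟩),
            if_neg hk, if_neg hc]

lemma hiPass_aux (hm : List String) (R d : Int) :
    ∀ (n : Nat) (a i_min : Int) (dct : PySem.Dict (Int × Int) Int),
    (a - i_min + 1).toNat = n → a ≤ min (R - 1) d →
    ∀ (key : Int × Int) (v : Int),
    (((PySem.List.pyRange a (i_min - 1) (-1)).foldl
      (fun st i =>
        if pvCell hm i (d - i) = 'X' ∨ pvCell hm i (d - i) = '@' then (i - 1, st.2)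
        else (st.1, st.2.insert (i, d - i) st.1))
      (pvHiF hm R a (d - a), dct)).2).getD key v =
    if key.2 = d - key.1 ∧ i_min ≤ key.1 ∧ key.1 ≤ a ∧
        ¬(pvCell hm key.1 key.2 = 'X' ∨ pvCell hm key.1 key.2 = '@')
      then pvHiF hm R key.1 key.2 else dct.getD key v := by
  intro n
  induction n with
  | zero =>
    intro a i_min dct hn ha key v
    rw [PySem.List.pyRange_neg_one_eq_nil (by omega), List.foldl_nil,
      if_neg (by rintro ⟨-, h2, h3, -⟩; omega)]
  | succ n ih =>
    intro a i_min dct hn ha key v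
    rw [PySem.List.pyRange_neg_one_cons (by omega), List.foldl_cons]
    have e1 : a - 1 + 1 = a := by ring
    have e2 : d - (a - 1) - 1 = d - a := by ring
    by_cases hblk : pvCell hm a (d - a) = 'X' ∨ pvCell hm a (d - a) = '@'
    · rw [if_pos hblk]
      have hstep : pvHiF hm R (a - 1) (d - (a - 1)) = a - 1 := by
        rw [pvHiF, dif_pos ⟨by omega, by omega⟩, e1, e2, if_pos hblk]
      rw [show ((a - 1 : Int), dct) = (pvHiF hm R (a-1) (d - (a-1)), dct) by rw [hstep],
        ih (a-1) i_min dct (by omega) (by omega) key v]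
      by_cases hc : key.2 = d - key.1 ∧ i_min ≤ key.1 ∧ key.1 ≤ a ∧
          ¬(pvCell hm key.1 key.2 = 'X' ∨ pvCell hm key.1 key.2 = '@')
      · obtain ⟨h1, h2, h3, h4⟩ := hc
        have hne : key.1 ≠ a := by
          intro he
          apply h4
          rw [he, h1, he]
          exact hblk
        rw [if_pos ⟨h1, h2, by omega, h4⟩, if_pos ⟨h1, h2, h3, h4⟩]
      · rw [if_neg (by rintro ⟨h1, h2, h3, h4⟩; exact hc ⟨h1, h2, by omega, h4⟩),
          if_neg hc]
    · rw [if_neg hblk]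
      have hstep : pvHiF hm R (a - 1) (d - (a - 1)) = pvHiF hm R a (d - a) := by
        rw [pvHiF, dif_pos ⟨by omega, by omega⟩, e1, e2, if_neg hblk]
      rw [show ((pvHiF hm R a (d-a) : Int), dct.insert (a, d - a) (pvHiF hm R a (d-a)))
            = (pvHiF hm R (a-1) (d - (a-1)), dct.insert (a, d - a) (pvHiF hm R a (d-a)))
            by rw [hstep],
        ih (a-1) i_min (dct.insert (a, d - a) (pvHiF hm R a (d-a))) (by omega) (by omega) key v,
        PySem.Dict.getD_insert]
      by_cases hk : key = (a, d - a)
      · rw [if_neg (by rintro ⟨-, -, h3, -⟩; rw [hk] at h3; simp at h3), if_pos hk,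
          if_pos (by rw [hk]; exact ⟨rfl, by omega, le_refl a, hblk⟩), hk]
      · by_cases hc : key.2 = d - key.1 ∧ i_min ≤ key.1 ∧ key.1 ≤ a ∧
            ¬(pvCell hm key.1 key.2 = 'X' ∨ pvCell hm key.1 key.2 = '@')
        · obtain ⟨h1, h2, h3, h4⟩ := hc
          have hne : key.1 ≠ a := by
            intro he
            exact hk (Prod.ext_iff.mpr ⟨he, by show key.2 = d - a; rw [h1, he]⟩)
          rw [if_pos ⟨h1, h2, by omega, h4⟩, if_pos ⟨h1, h2, h3, h4⟩]
        · rw [if_neg (by rintro ⟨h1, h2, h3, h4⟩; exact hc ⟨h1, h2, by omega, h4⟩),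
            if_neg hk, if_neg hc]

lemma lo_start (hm : List String) (C d : Int) :
    pvLoF hm C (max 0 (d - C + 1)) (d - max 0 (d - C + 1)) = max 0 (d - C + 1) := by
  rw [pvLoF, dif_neg (by omega)]

lemma hi_start (hm : List String) (R d : Int) :
    pvHiF hm R (min (R - 1) d) (d - min (R - 1) d) = min (R - 1) d := by
  rw [pvHiF, dif_neg (by omega)]

lemma tables_lo_getD (hm : List String) (R C : Int) :
    ∀ (ds : List Int) (t0 : PySem.Dict (Int × Int) Int) (r c v : Int),
    ((ds.foldl (fun t d => (pvLoPass hm d (max 0 (d - C + 1)) (min (R - 1) d) t).2) t0)).getD (r, c) v =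
    if (r + c) ∈ ds ∧ 0 ≤ r ∧ r ≤ R - 1 ∧ 0 ≤ c ∧ c ≤ C - 1 ∧
        ¬(pvCell hm r c = 'X' ∨ pvCell hm r c = '@')
      then pvLoF hm C r c else t0.getD (r, c) v := by
  intro ds
  induction ds with
  | nil => intro t0 r c v; simp
  | cons d rest ih =>
    intro t0 r c v
    rw [List.foldl_cons, ih]
    have hstep : (pvLoPass hm d (max 0 (d - C + 1)) (min (R - 1) d) t0).2.getD (r, c) v =
        if (c = d - r ∧ max 0 (d - C + 1) ≤ r ∧ r ≤ min (R - 1) d ∧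
            ¬(pvCell hm r c = 'X' ∨ pvCell hm r c = '@'))
          then pvLoF hm C r c else t0.getD (r, c) v := by
      rw [pvLoPass, show (max 0 (d - C + 1), t0)
            = (pvLoF hm C (max 0 (d - C + 1)) (d - max 0 (d - C + 1)), t0) by rw [lo_start],
        loPass_aux hm C d ((min (R - 1) d + 1 - max 0 (d - C + 1)).toNat)
          (max 0 (d - C + 1)) (min (R - 1) d) t0 rfl (le_refl _) (r, c) v]
    by_cases hrest : (r + c) ∈ rest ∧ 0 ≤ r ∧ r ≤ R - 1 ∧ 0 ≤ c ∧ c ≤ C - 1 ∧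
        ¬(pvCell hm r c = 'X' ∨ pvCell hm r c = '@')
    · obtain ⟨h1, h⟩ := hrest
      rw [if_pos ⟨h1, h⟩, if_pos ⟨List.mem_cons_of_mem d h1, h⟩]
    · rw [if_neg hrest, hstep]
      by_cases hd : c = d - r ∧ 0 ≤ r ∧ r ≤ R - 1 ∧ 0 ≤ c ∧ c ≤ C - 1 ∧
          ¬(pvCell hm r c = 'X' ∨ pvCell hm r c = '@')
      · obtain ⟨h1, h2, h3, h4, h5, h6⟩ := hd
        rw [if_pos ⟨h1, by omega, by omega, h6⟩,
          if_pos ⟨by rw [List.mem_cons]; left; omega, h2, h3, h4, h5, h6⟩]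
      · rw [if_neg (by rintro ⟨h1, h2, h3, h4⟩; exact hd ⟨h1, by omega, by omega, by omega, by omega, h4⟩),
          if_neg (by
            rintro ⟨h1, h⟩
            rcases List.mem_cons.mp h1 with he | hm'
            · exact hd ⟨by omega, h⟩
            · exact hrest ⟨hm', h⟩)]

lemma tables_hi_getD (hm : List String) (R C : Int) :
    ∀ (ds : List Int) (t0 : PySem.Dict (Int × Int) Int) (r c v : Int),
    ((ds.foldl (fun t d => (pvHiPass hm d (max 0 (d - C + 1)) (min (R - 1) d) t).2) t0)).getD (r, c) v =
    if (r + c) ∈ ds ∧ 0 ≤ r ∧ r ≤ R - 1 ∧ 0 ≤ c ∧ c ≤ C - 1 ∧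
        ¬(pvCell hm r c = 'X' ∨ pvCell hm r c = '@')
      then pvHiF hm R r c else t0.getD (r, c) v := by
  intro ds
  induction ds with
  | nil => intro t0 r c v; simp
  | cons d rest ih =>
    intro t0 r c v
    rw [List.foldl_cons, ih]
    have hstep : (pvHiPass hm d (max 0 (d - C + 1)) (min (R - 1) d) t0).2.getD (r, c) v =
        if (c = d - r ∧ max 0 (d - C + 1) ≤ r ∧ r ≤ min (R - 1) d ∧
            ¬(pvCell hm r c = 'X' ∨ pvCell hm r c = '@'))
          then pvHiF hm R r c else t0.getD (r, c) v := by
      rw [pvHiPass, show (min (R - 1) d, t0)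
            = (pvHiF hm R (min (R - 1) d) (d - min (R - 1) d), t0) by rw [hi_start],
        hiPass_aux hm R d (min (R - 1) d - max 0 (d - C + 1) + 1).toNat
          (min (R - 1) d) (max 0 (d - C + 1)) t0 rfl (le_refl _) (r, c) v]
    by_cases hrest : (r + c) ∈ rest ∧ 0 ≤ r ∧ r ≤ R - 1 ∧ 0 ≤ c ∧ c ≤ C - 1 ∧
        ¬(pvCell hm r c = 'X' ∨ pvCell hm r c = '@')
    · obtain ⟨h1, h⟩ := hrest
      rw [if_pos ⟨h1, h⟩, if_pos ⟨List.mem_cons_of_mem d h1, h⟩]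
    · rw [if_neg hrest, hstep]
      by_cases hd : c = d - r ∧ 0 ≤ r ∧ r ≤ R - 1 ∧ 0 ≤ c ∧ c ≤ C - 1 ∧
          ¬(pvCell hm r c = 'X' ∨ pvCell hm r c = '@')
      · obtain ⟨h1, h2, h3, h4, h5, h6⟩ := hd
        rw [if_pos ⟨h1, by omega, by omega, h6⟩,
          if_pos ⟨by rw [List.mem_cons]; left; omega, h2, h3, h4, h5, h6⟩]
      · rw [if_neg (by rintro ⟨h1, h2, h3, h4⟩; exact hd ⟨h1, by omega, by omega, by omega, by omega, h4⟩),
          if_neg (by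
            rintro ⟨h1, h⟩
            rcases List.mem_cons.mp h1 with he | hm'
            · exact hd ⟨by omega, h⟩
            · exact hrest ⟨hm', h⟩)]

lemma pvF_prefix (hm : List String) (d : Int) :
    ∀ (l : List Int) (acc1 acc2 : List (Int × Int)),
    l.foldl (pvF hm d) (acc1 ++ acc2) = acc1 ++ l.foldl (pvF hm d) acc2 := by
  intro l
  induction l with
  | nil => intro acc1 acc2; simp
  | cons x xs ih =>
    intro acc1 acc2
    rw [List.foldl_cons, List.foldl_cons]
    have h : pvF hm d (acc1 ++ acc2) x = acc1 ++ pvF hm d acc2 x := by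
      simp only [pvF]
      split_ifs <;> simp
    rw [h, ih]

lemma pvF_out (hm : List String) (d : Int) (l : List Int) (acc : List (Int × Int)) :
    l.foldl (pvF hm d) acc = acc ++ l.foldl (pvF hm d) [] := by
  conv_lhs => rw [show acc = acc ++ [] from (List.append_nil acc).symm]
  rw [pvF_prefix]

def pvG (hm : List String) (R C r c : Int) : List (Int × Int) :=
  (PySem.List.pyRange (r-1) (pvLoF hm C r c - 1) (-1)).foldl (pvF hm (r+c)) [] ++
  (PySem.List.pyRange (r+1) (pvHiF hm R r c + 1) 1).foldl (pvF hm (r+c)) []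

lemma filter_map_flatMap {α β γ : Type} (l : List α) (p : α → Bool) (f : α → β)
    (g : β → List γ) :
    ((l.filter p).map f).flatMap g = l.flatMap (fun x => if p x then g (f x) else []) := by
  induction l with
  | nil => rfl
  | cons x xs ih =>
    by_cases hp : p x
    · simp [hp, ih]
    · simp [hp, ih]

lemma a_flat (hm : List String) :
    adiag_invalid_list hm =
      (PySem.List.pyRange 0 ((((Option.map String.toList (PySem.List.pyGet? hm 0)).getD []).length : Int)) 1).flatMap
        (fun col => (PySem.List.pyRange 0 ((hm.length : Int)) 1).flatMap
          (fun r => if pvCell hm r col = 'p' then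
              pvG hm ((hm.length : Int)) ((((Option.map String.toList (PySem.List.pyGet? hm 0)).getD []).length : Int)) r col
            else [])) := by
  simp only [adiag_invalid_list]
  set R : Int := (hm.length : Int) with hR
  set C : Int := ((((Option.map String.toList (PySem.List.pyGet? hm 0)).getD []).length : Int)) with hC
  have hstep : (fun (acc : List (Int × Int)) (loc : Int × Int) =>
      pvSwWalk hm R loc.1 loc.2 (pvNeWalk hm C loc.1 loc.2 acc))
      = fun acc loc => acc ++ pvG hm R C loc.1 loc.2 := by
    funext acc loc
    rw [ne_walk_eq, sw_walk_eq, pvF_out hm (loc.1 + loc.2) _ acc, pvF_out hm (loc.1 + loc.2) _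
      (acc ++ (PySem.List.pyRange (loc.1 - 1) (pvLoF hm C loc.1 loc.2 - 1) (-1)).foldl (pvF hm (loc.1 + loc.2)) []),
      List.append_assoc, pvG]
  rw [hstep, PySem.List.foldl_append_eq_flatMap, List.nil_append, List.flatMap_assoc]
  simp only [filter_map_flatMap, beq_iff_eq]

lemma b_flat (hm : List String) :
    adiag_invalid_list_alt hm =
      (PySem.List.pyRange 0 ((((Option.map String.toList (PySem.List.pyGet? hm 0)).getD []).length : Int)) 1).flatMap
        (fun col => (PySem.List.pyRange 0 ((hm.length : Int)) 1).flatMap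
          (fun r => if pvCell hm r col = 'p' then
              pvG hm ((hm.length : Int)) ((((Option.map String.toList (PySem.List.pyGet? hm 0)).getD []).length : Int)) r col
            else [])) := by
  simp only [adiag_invalid_list_alt]
  set R : Int := (hm.length : Int) with hR
  set C : Int := ((((Option.map String.toList (PySem.List.pyGet? hm 0)).getD []).length : Int)) with hC
  rw [PySem.List.foldl_prod_mk
    (f := fun t d => (pvLoPass hm d (max 0 (d - C + 1)) (min (R - 1) d) t).2)
    (g := fun t d => (pvHiPass hm d (max 0 (d - C + 1)) (min (R - 1) d) t).2)]
  have hC0 : (0 : Int) ≤ C := by rw [hC]; exact Int.natCast_nonneg _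
  have hR0 : (0 : Int) ≤ R := by rw [hR]; exact Int.natCast_nonneg _
  have hin : ∀ (out : List (Int × Int)) (c : Int), c ∈ PySem.List.pyRange 0 C 1 →
      (PySem.List.pyRange 0 R 1).foldl
        (fun out r =>
          if pvCell hm r c = 'p' then
            List.foldl (fun a i => if pvCell hm i (r + c - i) = '.' then a ++ [(i, r + c - i)] else a)
              (List.foldl (fun a i => if pvCell hm i (r + c - i) = '.' then a ++ [(i, r + c - i)] else a) out
                (PySem.List.pyRange (r - 1)
                  (((PySem.List.pyRange 0 (R + C - 1) 1).foldl
                      (fun t d => (pvLoPass hm d (max 0 (d - C + 1)) (min (R - 1) d) t).2)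
                      PySem.Dict.empty).getD (r, c) 0 - 1) (-1)))
              (PySem.List.pyRange (r + 1)
                (((PySem.List.pyRange 0 (R + C - 1) 1).foldl
                    (fun t d => (pvHiPass hm d (max 0 (d - C + 1)) (min (R - 1) d) t).2)
                    PySem.Dict.empty).getD (r, c) 0 + 1))
          else out) out
      = out ++ (PySem.List.pyRange 0 R 1).flatMap
          (fun r => if pvCell hm r c = 'p' then pvG hm R C r c else []) := by
    intro out c hc
    have hcb := (PySem.List.mem_pyRange_one).mp hc
    refine Eq.trans (PySem.List.foldl_congr_mem _ _
      (fun out r => out ++ (if pvCell hm r c = 'p' then pvG hm R C r c else [])) _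
      (by
        intro acc r hr
        have hrb := (PySem.List.mem_pyRange_one).mp hr
        beta_reduce
        by_cases hp : pvCell hm r c = 'p'
        · rw [if_pos hp, if_pos hp]
          have hnb : ¬(pvCell hm r c = 'X' ∨ pvCell hm r c = '@') := by
            rintro (h | h) <;> (rw [hp] at h; cases h)
          have hmem : r + c ∈ PySem.List.pyRange 0 (R + C - 1) 1 :=
            (PySem.List.mem_pyRange_one).mpr ⟨by omega, by omega⟩
          have hlo : ((PySem.List.pyRange 0 (R + C - 1) 1).foldl
              (fun t d => (pvLoPass hm d (max 0 (d - C + 1)) (min (R - 1) d) t).2)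
              PySem.Dict.empty).getD (r, c) 0 = pvLoF hm C r c := by
            rw [tables_lo_getD hm R C, if_pos ⟨hmem, by omega, by omega, by omega, by omega, hnb⟩]
          have hhi : ((PySem.List.pyRange 0 (R + C - 1) 1).foldl
              (fun t d => (pvHiPass hm d (max 0 (d - C + 1)) (min (R - 1) d) t).2)
              PySem.Dict.empty).getD (r, c) 0 = pvHiF hm R r c := by
            rw [tables_hi_getD hm R C, if_pos ⟨hmem, by omega, by omega, by omega, by omega, hnb⟩]
          rw [hlo, hhi]
          show (PySem.List.pyRange (r+1) (pvHiF hm R r c + 1) 1).foldl (pvF hm (r+c))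
              ((PySem.List.pyRange (r-1) (pvLoF hm C r c - 1) (-1)).foldl (pvF hm (r+c)) acc)
              = acc ++ pvG hm R C r c
          rw [pvF_out hm (r+c) _ acc, pvF_out hm (r+c) _
            (acc ++ (PySem.List.pyRange (r-1) (pvLoF hm C r c - 1) (-1)).foldl (pvF hm (r+c)) []),
            List.append_assoc, pvG]
        · rw [if_neg hp, if_neg hp, List.append_nil]))
      (by apply PySem.List.foldl_append_eq_flatMap)
  refine Eq.trans (Eq.trans (PySem.List.foldl_congr_mem _ _
      (fun out c => out ++ (PySem.List.pyRange 0 R 1).flatMap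
          (fun r => if pvCell hm r c = 'p' then pvG hm R C r c else [])) _
      (by intro acc c hc; exact hin acc c hc))
      (by apply PySem.List.foldl_append_eq_flatMap)) (List.nil_append _)

-- ===== VERDICT (by name: the statement is the Claim_ definition above) =====
theorem adiag_invalid_list_spec : Claim_equal_adiag_invalid_list := by
  intro house_map _ _
  unfold Spec_adiag_invalid_list
  rw [a_flat, b_flat]
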